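-- pv_equiv track=rewrite | github.com/Maybetuandat/D21_PTIT | Semester5/Python/Code/PY01026_sap_dat_lai_xau_ki_tu.py | check
-- ===== SOURCE A (Python) =====
-- def check(s1, s2):
--     dem = {}
--     for i in s1:
--         if i in dem:
--             dem[i] +=1
--         else:
--             dem[i] = 1
--     for i in s2:
--         if i in dem and dem[i] > 0:
--             dem[i] -= 1
--         else:
--             return False
--     return True
-- ===== SOURCE B (Python) =====
-- def check(s1, s2):
--     return all(s2.count(c) <= s1.count(c) for c in set(s2))
-- ===== Notes on version B (the rewrite author's own statement) =====
-- stated objective: simpler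
-- what changed: Replaced the build-a-count-dict-then-decrement-with-early-return pass by a one-line multiset-subset test: for each distinct character of s2, compare s2.count with s1.count directly; no dictionary, no mutation, no early return.
import Mathlib
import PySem

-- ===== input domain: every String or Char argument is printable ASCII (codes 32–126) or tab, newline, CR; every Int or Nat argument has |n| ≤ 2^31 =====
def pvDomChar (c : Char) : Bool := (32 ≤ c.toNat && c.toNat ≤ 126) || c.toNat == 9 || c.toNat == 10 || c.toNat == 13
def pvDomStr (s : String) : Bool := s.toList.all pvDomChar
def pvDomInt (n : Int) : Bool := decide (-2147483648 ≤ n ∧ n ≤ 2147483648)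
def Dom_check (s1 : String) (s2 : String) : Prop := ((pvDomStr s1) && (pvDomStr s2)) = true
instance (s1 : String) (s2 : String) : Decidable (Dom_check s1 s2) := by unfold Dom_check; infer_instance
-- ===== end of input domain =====

-- B: one-line multiset-subset test (all distinct chars of s2 counted in both strings) instead of
-- A's count-dict build + decrement-with-early-return pass; objective: simpler.

-- ===== PORT A =====
-- for i in s1: if i in dem: dem[i] += 1 else: dem[i] = 1
def checkBuild (s1 : List Char) : PySem.Dict Char Int :=
  s1.foldl (fun dem i => if dem.contains i then dem.modify i 0 (· + 1) else dem.insert i 1)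
    PySem.Dict.empty

-- for i in s2: if i in dem and dem[i] > 0: dem[i] -= 1 else: return False
-- (dem[i] is read as 'dem.getD i 0'; exact here since it is only read under 'i in dem')
def checkLoop (dem : PySem.Dict Char Int) : List Char → Bool
  | [] => true
  | i :: rest =>
    if dem.contains i ∧ dem.getD i 0 > 0 then checkLoop (dem.modify i 0 (· - 1)) rest
    else false

def check (s1 : String) (s2 : String) : Bool :=
  checkLoop (checkBuild s1.toList) s2.toList

-- ===== PORT B =====
-- all(s2.count(c) <= s1.count(c) for c in set(s2))
-- (str.count of a single character is List.count of that char; 'all' over a set is order-independent)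
def check_alt (s1 : String) (s2 : String) : Bool :=
  (PySem.Set.ofList s2.toList).all (fun c => s2.toList.count c ≤ s1.toList.count c)

-- ===== PRECONDITION & SPEC =====
def Spec_check (s1 : String) (s2 : String) (out : Bool) : Prop := out = check_alt s1 s2
instance (s1 : String) (s2 : String) (out : Bool) : Decidable (Spec_check s1 s2 out) := by unfold Spec_check; infer_instance

-- ===== CLAIM (what is proved, stated in full; the proofs are below) =====
def Claim_equal_check : Prop := ∀ (s1 : String) (s2 : String), Dom_check s1 s2 → Spec_check s1 s2 (check s1 s2)

-- ===== LEMMAS AND PROOFS =====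

-- A's dict-building loop computes Counter(s1): each step is exactly the 'modify' counter step.
theorem checkBuild_eq_counter (s1 : List Char) : checkBuild s1 = PySem.Dict.counter s1 := by
  rw [PySem.Dict.counter_eq_foldl, checkBuild]
  congr 1
  funext dem i
  by_cases h : dem.contains i
  · simp [h]
  · simp only [Bool.not_eq_true] at h
    simp [h, PySem.Dict.modify, PySem.Dict.getD_of_not_contains _ _ h]

-- A's second loop succeeds iff every character's count in the remaining suffix fits in dem.
theorem checkLoop_iff (l : List Char) (dem : PySem.Dict Char Int) :
    checkLoop dem l = true ↔ ∀ c ∈ l, (l.count c : Int) ≤ dem.getD c 0 := by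
  induction l generalizing dem with
  | nil => simp [checkLoop]
  | cons i rest ih =>
    rw [checkLoop]
    by_cases h : dem.contains i ∧ dem.getD i 0 > 0
    · rw [if_pos h, ih]
      constructor
      · intro hr c hc
        by_cases hci : c = i
        · subst hci
          simp only [List.count_cons, beq_self_eq_true, if_true]
          by_cases hm : c ∈ rest
          · have h2 := hr c hm
            rw [PySem.Dict.getD_modify_self] at h2
            push_cast
            omega
          · rw [List.count_eq_zero_of_not_mem hm]
            push_cast
            omega
        · have hm : c ∈ rest := by
            cases hc with
            | head => exact absurd rfl hci
            | tail _ hm => exact hm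
          have h2 := hr c hm
          rw [PySem.Dict.getD_modify_of_ne _ _ _ hci] at h2
          simp only [List.count_cons, beq_iff_eq, Ne.symm hci, if_false]
          simpa using h2
      · intro hall c hc
        by_cases hci : c = i
        · subst hci
          have h2 := hall c List.mem_cons_self
          simp only [List.count_cons, beq_self_eq_true, if_true] at h2
          rw [PySem.Dict.getD_modify_self]
          push_cast at h2 ⊢
          omega
        · have h2 := hall c (List.mem_cons_of_mem _ hc)
          simp only [List.count_cons, beq_iff_eq, Ne.symm hci, if_false] at h2
          rw [PySem.Dict.getD_modify_of_ne _ _ _ hci]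
          simpa using h2
    · rw [if_neg h]
      simp only [Bool.false_eq_true, false_iff]
      intro hall
      have hi := hall i List.mem_cons_self
      simp only [List.count_cons, beq_self_eq_true, if_true] at hi
      have hle : dem.getD i 0 ≤ 0 := by
        by_cases hc : dem.contains i
        · push Not at h
          exact h hc
        · simp only [Bool.not_eq_true] at hc
          rw [PySem.Dict.getD_of_not_contains _ _ hc]
      have hnn : (0:Int) ≤ rest.count i := Int.natCast_nonneg _
      push_cast at hi
      omega

-- ===== VERDICT (by name: the statement is the Claim_ definition above) =====
theorem check_spec : Claim_equal_check := by
  intro s1 s2 _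
  unfold Spec_check check check_alt
  rw [checkBuild_eq_counter, Bool.eq_iff_iff, checkLoop_iff]
  simp only [List.all_eq_true, decide_eq_true_eq, PySem.Set.mem_ofList, PySem.Dict.getD_counter]
  exact ⟨fun h c hc => by exact_mod_cast h c hc, fun h c hc => by exact_mod_cast h c hc⟩
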